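-- pv_equiv track=rewrite | github.com/dijin1000/Bakeoff | PoemGenerator/PoemGenerator/Code/functions.py | reversen_grams
-- ===== SOURCE A (Python) =====
-- def reversen_grams(tokens, n):
--     n_grams = []
--     for i in range(len(tokens)-1, 0+n-2, -1):
--         n_gram = []
--         for j in range(i, i-n, -1):
--             n_gram.append(tokens[j])
--         n_grams.append(n_gram)
--     return n_grams
-- ===== SOURCE B (Python) =====
-- def reversen_grams(tokens, n):
--     if n < 0:
--         return []
--     rt = list(reversed(tokens))
--     return [rt[k:k+n] for k in range(len(tokens) - n + 1)]
-- ===== Notes on version B (the rewrite author's own statement) =====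
-- stated objective: alternative
-- what changed: B reverses the token list once and emits forward slices rt[k:k+n] of the reversed list, replacing A's two nested descending index loops with one reversal plus a slicing pass; B rejects negative n up front.
-- intended difference: For n < 0, A returns len(tokens)-n+1 empty lists (an artefact of its empty inner loop over range(i, i-n, -1)), while B returns [], the intended value since windows of negative size do not exist. — e.g. on reversen_grams(["a"], -1): A returns [[], [], []], B returns []
import Mathlib
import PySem

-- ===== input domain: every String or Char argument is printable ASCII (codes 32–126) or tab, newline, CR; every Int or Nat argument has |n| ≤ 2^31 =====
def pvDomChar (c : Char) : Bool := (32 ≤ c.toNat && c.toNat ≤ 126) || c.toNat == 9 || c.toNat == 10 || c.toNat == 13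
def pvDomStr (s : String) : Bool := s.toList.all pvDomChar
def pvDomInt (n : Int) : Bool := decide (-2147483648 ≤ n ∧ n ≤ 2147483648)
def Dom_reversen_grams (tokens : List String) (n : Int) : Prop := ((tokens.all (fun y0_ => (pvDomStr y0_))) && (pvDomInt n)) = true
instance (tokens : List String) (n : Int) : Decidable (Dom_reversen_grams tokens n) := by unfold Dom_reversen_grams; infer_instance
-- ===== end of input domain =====

-- B reverses the list once and takes forward slices instead of A's nested descending
-- index loops; for n < 0 (where A's empty-list output is an artefact) B returns [].

-- ===== PORT A =====
-- literal transliteration of A: outer loop range(len(tokens)-1, 0+n-2, -1),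
-- inner loop range(i, i-n, -1) appending tokens[j] (always in range when reached)
def reversen_grams (tokens : List String) (n : Int) : List (List String) :=
  (PySem.List.pyRange ((tokens.length : Int) - 1) (0 + n - 2) (-1)).foldl
    (fun n_grams i =>
      n_grams ++ [(PySem.List.pyRange i (i - n) (-1)).foldl
        (fun n_gram j => n_gram ++ [PySem.List.pyGetD tokens j ""]) []]) []

-- ===== PORT B =====
-- literal transliteration of B: list(reversed(tokens)) is List.reverse;
-- rt[k:k+n] is PySem.List.slice
def reversen_grams_alt (tokens : List String) (n : Int) : List (List String) :=
  if n < 0 then []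
  else
    let rt := tokens.reverse
    (PySem.List.pyRange 0 ((tokens.length : Int) - n + 1) 1).map
      (fun k => PySem.List.slice rt (some k) (some (k + n)))

-- ===== PRECONDITION & SPEC =====
-- For n < 0, A returns len(tokens)-n+1 empty lists (an artefact of its empty inner
-- loop), while B returns [], the intended value: windows of negative size do not exist.
def D_reversen_grams (tokens : List String) (n : Int) : Prop := n < 0
instance (tokens : List String) (n : Int) : Decidable (D_reversen_grams tokens n) := by unfold D_reversen_grams; infer_instance

def Spec_reversen_grams (tokens : List String) (n : Int) (out : List (List String)) : Prop := ¬ D_reversen_grams tokens n → out = reversen_grams_alt tokens n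
instance (tokens : List String) (n : Int) (out : List (List String)) : Decidable (Spec_reversen_grams tokens n out) := by unfold Spec_reversen_grams; infer_instance

def pvDiffWitness_reversen_grams : List String × Int := (["a"], -1)
def pvDiffWitnessOut_reversen_grams : (List (List String)) × (List (List String)) := ([[], [], []], [])

-- ===== CLAIM (what is proved, stated in full; the proofs are below) =====
def Claim_unchanged_reversen_grams : Prop := ∀ (tokens : List String) (n : Int), Dom_reversen_grams tokens n → Spec_reversen_grams tokens n (reversen_grams tokens n)
def Claim_changed_reversen_grams : Prop := Dom_reversen_grams (pvDiffWitness_reversen_grams.1) (pvDiffWitness_reversen_grams.2) ∧ D_reversen_grams (pvDiffWitness_reversen_grams.1) (pvDiffWitness_reversen_grams.2) ∧ reversen_grams (pvDiffWitness_reversen_grams.1) (pvDiffWitness_reversen_grams.2) = pvDiffWitnessOut_reversen_grams.1 ∧ reversen_grams_alt (pvDiffWitness_reversen_grams.1) (pvDiffWitness_reversen_grams.2) = pvDiffWitnessOut_reversen_grams.2 ∧ pvDiffWitnessOut_reversen_grams.1 ≠ pvDiffWitnessOut_reversen_grams.2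
def Claim_exact_reversen_grams : Prop := ∀ (tokens : List String) (n : Int), Dom_reversen_grams tokens n → D_reversen_grams tokens n → reversen_grams tokens n ≠ reversen_grams_alt tokens n

-- ===== LEMMAS AND PROOFS =====

-- one window: A's descending inner loop over tokens equals B's forward slice of the reversed list
lemma window_eq (tokens : List String) (N k : Nat)
    (hk : k + N ≤ tokens.length) :
    (PySem.List.pyRange ((tokens.length : Int) - 1 - k) ((tokens.length : Int) - 1 - k - N) (-1)).map
      (fun j => PySem.List.pyGetD tokens j "")
    = PySem.List.slice tokens.reverse (some (k : Int)) (some ((k : Int) + N)) := by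
  rw [PySem.List.slice_natCast_add, PySem.List.pyRange_neg_one, List.map_map]
  have hlen : ((tokens.length : Int) - 1 - ↑k - (((tokens.length : Int) - 1 - ↑k) - ↑N)).toNat = N := by omega
  rw [hlen]
  apply List.ext_getElem
  · simp; omega
  · intro j h1 h2
    simp only [List.getElem_map, List.getElem_range, Function.comp]
    rw [List.getElem_take, List.getElem_drop, List.getElem_reverse]
    have hj : j < N := by simpa using h1
    have hidx : ((tokens.length : Int) - 1 - ↑k - ↑j) = ((tokens.length - 1 - (k + j) : Nat) : Int) := by omega
    rw [hidx, PySem.List.pyGetD_natCast]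
    rw [List.getD_eq_getElem?_getD, List.getElem?_eq_getElem (by omega)]
    rfl

lemma main_eq (tokens : List String) (n : Int) (hn : 0 ≤ n) :
    reversen_grams tokens n = reversen_grams_alt tokens n := by
  obtain ⟨N, rfl⟩ := Int.eq_ofNat_of_zero_le hn
  unfold reversen_grams reversen_grams_alt
  rw [if_neg (by omega)]
  simp only [PySem.List.foldl_append_singleton_eq_map]
  rw [PySem.List.pyRange_neg_one, PySem.List.pyRange_one, List.map_map, List.map_map]
  have hM : (((tokens.length : Int) - 1) - (0 + (N : Int) - 2)).toNat
      = (((tokens.length : Int) - (N : Int) + 1) - 0).toNat := by omega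
  rw [hM]
  refine List.map_congr_left (fun k hk => ?_)
  rw [List.mem_range] at hk
  have hkN : k + N ≤ tokens.length := by omega
  have h1 : (tokens.length : Int) - 1 - ↑k - ((tokens.length : Int) - 1 - ↑k - ↑N)
      = (N : Int) := by ring
  have := window_eq tokens N k hkN
  simpa [Function.comp, sub_sub] using this

-- ===== VERDICT (by name: the statements are the Claim_ definitions above) =====
theorem reversen_grams_spec : Claim_unchanged_reversen_grams := by
  intro tokens n _ hD
  exact main_eq tokens n (by unfold D_reversen_grams at hD; omega)

theorem reversen_grams_changed : Claim_changed_reversen_grams := by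
  unfold Claim_changed_reversen_grams; decide

theorem reversen_grams_tight : Claim_exact_reversen_grams := by
  intro tokens n _ hD
  unfold D_reversen_grams at hD
  unfold reversen_grams reversen_grams_alt
  rw [if_pos hD]
  intro h
  have hlen := congrArg List.length h
  simp only [PySem.List.foldl_append_singleton_eq_map, List.length_nil, List.nil_append,
    List.length_map, PySem.List.length_pyRange_neg_one] at hlen
  omega
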